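-- pv_equiv track=rewrite | github.com/Information-Fusion-Lab-Umass/flare | disease_forecast/datagen.py | get_which_visits
-- ===== SOURCE A (Python) =====
-- def get_which_visits(visits):
--     """
--     JW: Returns list of visits in integer form where bl -> 0, m06 ->1, ...
--     """
--     which_visits = []
--     dict_visit2int = {'bl':0,
--           'm06':1,
--           'm12':2,
--           'm18':3,
--           'm24':4,
--           'm36':5,
--           'none':-1}
--     for key in visits:
--         which_visits.append(dict_visit2int[key])
--
--     which_visits = [x for x in which_visits if x != -1]
--     return sorted(which_visits)
-- ===== SOURCE B (Python) =====
-- def get_which_visits(visits):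
--     """Counting/bucket construction: codes are bounded (0..5), so tally each
--     code in one pass and emit each value count times in increasing order."""
--     dict_visit2int = {'bl': 0,
--                       'm06': 1,
--                       'm12': 2,
--                       'm18': 3,
--                       'm24': 4,
--                       'm36': 5,
--                       'none': -1}
--     counts = [0] * 6
--     for key in visits:
--         v = dict_visit2int[key]
--         if v != -1:
--             counts[v] += 1
--     out = []
--     for value in range(6):
--         out += [value] * counts[value]
--     return out
-- ===== Notes on version B (the rewrite author's own statement) =====
-- stated objective: alternative
-- what changed: Replaces map+filter+comparison sort with a single-pass counting sort over the bounded code range 0..5, emitting each value count times (the -1 'none' code is simply never tallied).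
import Mathlib
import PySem

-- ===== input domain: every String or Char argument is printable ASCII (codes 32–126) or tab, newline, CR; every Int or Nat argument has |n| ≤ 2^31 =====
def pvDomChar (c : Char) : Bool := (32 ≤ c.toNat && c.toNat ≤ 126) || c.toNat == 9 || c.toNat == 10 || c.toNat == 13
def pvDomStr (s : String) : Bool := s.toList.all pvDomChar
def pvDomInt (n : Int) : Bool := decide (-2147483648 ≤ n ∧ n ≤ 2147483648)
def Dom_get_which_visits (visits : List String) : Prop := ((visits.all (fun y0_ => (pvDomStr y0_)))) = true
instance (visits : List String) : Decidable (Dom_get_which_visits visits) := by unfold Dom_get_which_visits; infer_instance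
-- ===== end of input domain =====

-- B replaces A's map+filter+comparison sort by a one-pass tally over the bounded
-- code range 0..5 followed by emitting each value count times (a counting sort).

-- the visit→int dictionary both sources build
def visitDict : PySem.Dict String Int :=
  PySem.Dict.mk [("bl", 0), ("m06", 1), ("m12", 2), ("m18", 3), ("m24", 4), ("m36", 5), ("none", -1)]

-- dict_visit2int[key]; a missing key raises KeyError in Python — excluded by Pre_
def lookupVisit (key : String) : Int := (PySem.Dict.get? visitDict key).getD (-1)

-- ===== PORT A =====
def get_which_visits (visits : List String) : List Int :=
  let which_visits := visits.foldl (fun acc key => acc ++ [lookupVisit key]) []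
  let which_visits := which_visits.filter (fun x => x != -1)
  PySem.List.sorted which_visits (fun x => x) false

-- ===== PORT B =====
-- the body of B's tally loop: counts[v] += 1 unless v is the 'none' code -1
def tallyStep (cnt : List Nat) (key : String) : List Nat :=
  let v := lookupVisit key
  if v != -1 then cnt.modify v.toNat (· + 1) else cnt

def get_which_visits_alt (visits : List String) : List Int :=
  let counts := visits.foldl tallyStep (List.replicate 6 (0 : Nat))
  (PySem.List.pyRange 0 6 1).foldl (fun out value =>
      out ++ List.replicate (counts.getD value.toNat 0) value) []

-- ===== PRECONDITION & SPEC =====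
-- Pre_ excludes exactly the inputs on which Python A raises KeyError (and Python B
-- does too): a visit name that is not a key of the dictionary.
def Pre_get_which_visits (visits : List String) : Prop :=
  ∀ k ∈ visits, k ∈ ["bl", "m06", "m12", "m18", "m24", "m36", "none"]
instance (visits : List String) : Decidable (Pre_get_which_visits visits) := by
  unfold Pre_get_which_visits; infer_instance

def pvWitness_get_which_visits : List String := ["m12", "bl", "none", "m12", "m36"]

def Spec_get_which_visits (visits : List String) (out : List Int) : Prop := out = get_which_visits_alt visits
instance (visits : List String) (out : List Int) : Decidable (Spec_get_which_visits visits out) := by unfold Spec_get_which_visits; infer_instance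

-- ===== CLAIM (what is proved, stated in full; the proofs are below) =====
def Claim_equal_get_which_visits : Prop := ∀ (visits : List String), Dom_get_which_visits visits → Pre_get_which_visits visits → Spec_get_which_visits visits (get_which_visits visits)

-- ===== LEMMAS AND PROOFS =====

-- every dictionary value is -1 or lies in [0, 6)
theorem lookupVisit_range (key : String) :
    lookupVisit key = -1 ∨ (0 ≤ lookupVisit key ∧ lookupVisit key < 6) := by
  unfold lookupVisit visitDict
  repeat rw [PySem.Dict.get?_mk_cons]
  split_ifs <;> simp [PySem.Dict.get?]

-- the filtered, mapped list that A sorts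
def visitCodes (visits : List String) : List Int :=
  (visits.map lookupVisit).filter (fun x => x != -1)

theorem visitCodes_mem {visits : List String} {x : Int} (hx : x ∈ visitCodes visits) :
    0 ≤ x ∧ x < 6 := by
  simp only [visitCodes, List.mem_filter, List.mem_map] at hx
  obtain ⟨⟨k, _, rfl⟩, hne⟩ := hx
  rcases lookupVisit_range k with h | h
  · simp [h] at hne
  · exact h

-- B's tally loop computes the multiplicity of each code in visitCodes
theorem counts_spec (visits : List String) :
    ∀ (cnt : List Nat), cnt.length = 6 → ∀ j : Nat, j < 6 →
      (visits.foldl tallyStep cnt).getD j 0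
        = cnt.getD j 0 + (visitCodes visits).count (j : Int) := by
  induction visits with
  | nil => intro cnt _ j _; simp [visitCodes]
  | cons key rest ih =>
    intro cnt hlen j hj
    rw [List.foldl_cons]
    by_cases hv : lookupVisit key = -1
    · have hstep : tallyStep cnt key = cnt := by simp [tallyStep, hv]
      rw [hstep, ih cnt hlen j hj]
      simp [visitCodes, hv]
    · have hb : 0 ≤ lookupVisit key ∧ lookupVisit key < 6 := by
        rcases lookupVisit_range key with h | h
        · exact absurd h hv
        · exact h
      have hstep : tallyStep cnt key = cnt.modify (lookupVisit key).toNat (· + 1) := by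
        simp [tallyStep, hv]
      rw [hstep, ih _ (by rw [List.length_modify]; exact hlen) j hj]
      have hmod : (cnt.modify (lookupVisit key).toNat (· + 1)).getD j 0
          = cnt.getD j 0 + (if (lookupVisit key).toNat = j then 1 else 0) := by
        rw [List.getD_eq_getElem?_getD, List.getElem?_modify, List.getD_eq_getElem?_getD]
        rw [List.getElem?_eq_getElem (by omega : j < cnt.length)]
        split_ifs <;> simp
      rw [hmod]
      have hcnt : (visitCodes (key :: rest)).count (j : Int)
          = (if (lookupVisit key).toNat = j then 1 else 0) + (visitCodes rest).count (j : Int) := by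
        simp only [visitCodes, List.map_cons, List.filter_cons]
        have h1 : (lookupVisit key != -1) = true := by simp [hv]
        rw [h1]
        simp only [if_true, List.count_cons]
        have h2 : ((lookupVisit key).toNat = j) ↔ (lookupVisit key = (j : Int)) := by omega
        by_cases he : lookupVisit key = (j : Int) <;> simp [he, h2] <;> omega
      rw [hcnt]; omega

-- the concatenation of increasing constant buckets is sorted
theorem pairwise_buckets (n0 n1 n2 n3 n4 n5 : Nat) :
    List.Pairwise (fun x1 x2 => x1 ≤ x2)
      (List.replicate n0 (0 : Int) ++ List.replicate n1 1 ++ List.replicate n2 2 ++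
        List.replicate n3 3 ++ List.replicate n4 4 ++ List.replicate n5 5) := by
  simp only [List.pairwise_append, List.pairwise_replicate, List.mem_replicate, List.mem_append]
  refine ⟨⟨⟨⟨⟨?_, ?_, ?_⟩, ?_, ?_⟩, ?_, ?_⟩, ?_, ?_⟩, ?_, ?_⟩ <;> intros <;> omega

theorem ports_agree (visits : List String) : get_which_visits visits = get_which_visits_alt visits := by
  unfold get_which_visits get_which_visits_alt
  rw [PySem.List.foldl_append_singleton_eq_map]
  simp only [List.nil_append]
  have hc : ∀ j : Nat, j < 6 →
      (visits.foldl tallyStep (List.replicate 6 (0 : Nat))).getD j 0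
        = (visitCodes visits).count (j : Int) := by
    intro j hj
    rw [counts_spec visits _ (by simp) j hj, List.getD_eq_getElem?_getD]
    interval_cases j <;> simp
  have hr : PySem.List.pyRange 0 6 1 = [0, 1, 2, 3, 4, 5] := by decide
  rw [hr]
  simp only [List.foldl_cons, List.foldl_nil, List.nil_append]
  simp only [show Int.toNat 0 = 0 from rfl, show Int.toNat 1 = 1 from rfl,
    show Int.toNat 2 = 2 from rfl, show Int.toNat 3 = 3 from rfl,
    show Int.toNat 4 = 4 from rfl, show Int.toNat 5 = 5 from rfl]
  rw [hc 0 (by norm_num), hc 1 (by norm_num), hc 2 (by norm_num), hc 3 (by norm_num),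
      hc 4 (by norm_num), hc 5 (by norm_num)]
  push_cast
  apply PySem.List.sorted_id_eq_of_perm_of_pairwise
  · rw [List.perm_iff_count]
    intro a
    by_cases ha : 0 ≤ a ∧ a < 6
    · obtain ⟨h1, h2⟩ := ha
      interval_cases a <;> simp [List.count_append, List.count_replicate, visitCodes, List.count_filter]
    · have hnl : a ∉ visitCodes visits := fun hm => ha (visitCodes_mem hm)
      have h0 : List.count a (List.filter (fun x => x != -1) (List.map lookupVisit visits)) = 0 :=
        List.count_eq_zero.mpr hnl
      rw [h0]
      simp only [List.count_append, List.count_replicate]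
      split_ifs <;> simp only [beq_iff_eq] at * <;> omega
  · exact pairwise_buckets _ _ _ _ _ _

-- ===== VERDICT (by name: the statement is the Claim_ definition above) =====
theorem get_which_visits_spec : Claim_equal_get_which_visits := by
  intro visits _ _
  exact ports_agree visits
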